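-- pv_equiv track=rewrite | github.com/amBITion-24/nethra_setu | NethraSetu-2/LiveFeed/tempCodeRunnerFile.py | get_final_detection
-- ===== SOURCE A (Python) =====
-- from collections import Counter
--
-- def get_final_detection(detections, static_list):
--     all_detections = [item for sublist in detections for item in sublist]
--     if all_detections:
--         counter = Counter(all_detections)
--         for item, _ in counter.most_common():
--             if item in static_list:
--                 return item
--     return None
-- ===== SOURCE B (Python) =====
-- def get_final_detection(detections, static_list):
--     allowed = set(static_list)
--     counter = {}
--     for sublist in detections:
--         for item in sublist:
--             counter[item] = counter.get(item, 0) + 1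
--     best_item, best_count = None, 0
--     for item, count in counter.items():
--         if item in allowed and count > best_count:
--             best_item, best_count = item, count
--     return best_item
-- ===== Notes on version B (the rewrite author's own statement) =====
-- stated objective: simpler
-- what changed: Replaces Counter + full most_common() sort + scan with a single linear pass over the counts dict keeping the best static_list item via strict '>', which reproduces most_common()'s stable tie-breaking without sorting.
import Mathlib
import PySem

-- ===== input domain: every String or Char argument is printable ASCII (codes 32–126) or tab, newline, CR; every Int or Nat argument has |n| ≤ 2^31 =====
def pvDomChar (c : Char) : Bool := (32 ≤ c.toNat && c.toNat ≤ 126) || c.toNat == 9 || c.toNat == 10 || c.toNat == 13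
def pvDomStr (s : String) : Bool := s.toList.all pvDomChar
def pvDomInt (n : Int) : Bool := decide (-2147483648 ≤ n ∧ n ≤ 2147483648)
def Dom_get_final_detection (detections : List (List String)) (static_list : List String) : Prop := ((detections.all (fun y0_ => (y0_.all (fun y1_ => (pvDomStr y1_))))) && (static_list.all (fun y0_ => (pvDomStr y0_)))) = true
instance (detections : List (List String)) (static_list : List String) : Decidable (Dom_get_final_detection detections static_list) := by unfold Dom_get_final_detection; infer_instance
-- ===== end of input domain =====

-- B replaces Counter.most_common()'s sort-then-scan by one strict-'>' max pass over the counts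
-- in insertion order (objective: simpler). Equivalence of the return value is proved for all inputs.

-- ===== PORT A =====
-- 'for item, _ in counter.most_common(): if item in static_list: return item'; falls through to None
def pvLoopA : List (String × Int) → List String → Option String
  | [], _ => none
  | kv :: rest, sl => if sl.contains kv.1 then some kv.1 else pvLoopA rest sl

def get_final_detection (detections : List (List String)) (static_list : List String) : Option String :=
  let all_detections := detections.flatMap (fun sublist => sublist)
  if all_detections = [] then none
  else
    let counter := PySem.Dict.counter all_detections
    -- most_common() = sorted(counter.items(), key=itemgetter(1), reverse=True) (stable)
    pvLoopA (PySem.List.sorted counter.items (fun kv => kv.2) true) static_list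

-- ===== PORT B =====
def get_final_detection_alt (detections : List (List String)) (static_list : List String) : Option String :=
  let allowed := PySem.Set.ofList static_list
  let counter := detections.foldl
    (fun d sublist => sublist.foldl (fun d item => d.insert item (d.getD item 0 + 1)) d)
    PySem.Dict.empty
  (counter.items.foldl
    (fun (best : Option String × Int) kv =>
      if PySem.Set.contains allowed kv.1 && decide (best.2 < kv.2) then (some kv.1, kv.2) else best)
    (none, 0)).1

-- ===== PRECONDITION & SPEC =====
def Spec_get_final_detection (detections : List (List String)) (static_list : List String) (out : Option String) : Prop := out = get_final_detection_alt detections static_list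
instance (detections : List (List String)) (static_list : List String) (out : Option String) : Decidable (Spec_get_final_detection detections static_list out) := by unfold Spec_get_final_detection; infer_instance

-- ===== CLAIM (what is proved, stated in full; the proofs are below) =====
def Claim_equal_get_final_detection : Prop := ∀ (detections : List (List String)) (static_list : List String), Dom_get_final_detection detections static_list → Spec_get_final_detection detections static_list (get_final_detection detections static_list)

-- ===== LEMMAS AND PROOFS =====

-- A's loop is find? on the first component, mapped
theorem pvLoopA_eq_find? (l : List (String × Int)) (sl : List String) :
    pvLoopA l sl = (l.find? (fun kv => sl.contains kv.1)).map (·.1) := by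
  induction l with
  | nil => rfl
  | cons kv rest ih =>
      by_cases h : kv.1 ∈ sl
      · simp [pvLoopA, List.find?_cons_of_pos, h]
      · simp [pvLoopA, List.find?_cons_of_neg, h, ih]

-- insertBy decomposes as takeWhile/dropWhile on the negated test
theorem insertBy_eq_take_drop {α : Type} (before : α → α → Bool) (x : α) (s : List α) :
    PySem.List.insertBy before x s
      = s.takeWhile (fun y => !before x y) ++ x :: s.dropWhile (fun y => !before x y) := by
  induction s with
  | nil => rfl
  | cons y ys ih =>
      by_cases h : before x y = true
      · simp [PySem.List.insertBy, h]
      · simp only [Bool.not_eq_true] at h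
        simp [PySem.List.insertBy, h, ih]

theorem insertBy_eq_take_drop' (x : String × Int) (s : List (String × Int)) :
    PySem.List.insertBy (fun a b => decide (b.2 < a.2)) x s
      = s.takeWhile (fun y => !decide (y.2 < x.2)) ++ x :: s.dropWhile (fun y => !decide (y.2 < x.2)) :=
  insertBy_eq_take_drop _ x s

def pvStep (Q : String × Int → Bool) (best : Option String × Int) (kv : String × Int) :
    Option String × Int :=
  if Q kv && decide (best.2 < kv.2) then (some kv.1, kv.2) else best

def pvOptState : Option (String × Int) → Option String × Int
  | none => (none, 0)
  | some m => (some m.1, m.2)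

theorem pvDropWhile_head_false {α : Type} (p : α → Bool) (s : List α) (h0 : α) (t : List α)
    (h : s.dropWhile p = h0 :: t) : p h0 = false := by
  induction s with
  | nil => simp [List.dropWhile] at h
  | cons y ys ih =>
      rw [List.dropWhile_cons] at h
      split at h
      · exact ih h
      · next hy => cases h; simpa using hy

theorem pvMem_drop_lt (x : String × Int) (s : List (String × Int))
    (hdesc : s.Pairwise (fun a b => b.2 ≤ a.2))
    (m : String × Int) (hm : m ∈ s.dropWhile (fun y => !decide (y.2 < x.2))) : m.2 < x.2 := by
  cases hd : s.dropWhile (fun y => !decide (y.2 < x.2)) with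
  | nil => rw [hd] at hm; simp at hm
  | cons h0 t =>
      have hph0 := pvDropWhile_head_false _ s h0 t hd
      have h0lt : h0.2 < x.2 := by simpa using hph0
      have hdesc' : (h0 :: t).Pairwise (fun a b : String × Int => b.2 ≤ a.2) :=
        hd ▸ hdesc.sublist (List.dropWhile_sublist _)
      rw [hd] at hm
      rcases List.mem_cons.mp hm with rfl | hmt
      · exact h0lt
      · have := (List.pairwise_cons.mp hdesc').1 m hmt; omega

-- core lemma: strict-'>' fold over l = find? over the stable reverse sort of l
theorem best_fold_eq (Q : String × Int → Bool) (l : List (String × Int))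
    (hpos : ∀ kv ∈ l, 0 < kv.2) :
    l.foldl (pvStep Q) (none, 0)
      = pvOptState ((PySem.List.sorted l (fun kv => kv.2) true).find? Q) := by
  induction l using List.reverseRecOn with
  | nil => rfl
  | append_singleton l x ih =>
      have hx : (0 : Int) < x.2 := hpos x (by simp)
      have hpos' : ∀ kv ∈ l, 0 < kv.2 := fun kv h => hpos kv (by simp [h])
      rw [List.foldl_append, List.foldl_cons, List.foldl_nil, ih hpos']
      have hsort : PySem.List.sorted (l ++ [x]) (fun kv => kv.2) true
          = PySem.List.insertBy (fun a b => decide (b.2 < a.2)) x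
              (PySem.List.sorted l (fun kv => kv.2) true) := by
        rw [PySem.List.sorted_rev_eq_foldl_insertBy, PySem.List.sorted_rev_eq_foldl_insertBy,
          List.foldl_append]
        rfl
      set s := PySem.List.sorted l (fun kv => kv.2) true with hs
      have hdesc : s.Pairwise (fun a b : String × Int => b.2 ≤ a.2) :=
        PySem.List.sorted_pairwise_rev l (fun kv => kv.2)
      rw [hsort, insertBy_eq_take_drop', List.find?_append]
      by_cases hQx : Q x = true
      · cases h1 : List.find? Q (s.takeWhile (fun y => !decide (y.2 < x.2))) with
        | some m =>
            have hpm := List.mem_takeWhile_imp (List.mem_of_find?_eq_some h1)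
            have hnlt : ¬ (m.2 < x.2) := by simpa using hpm
            have hfs : List.find? Q s = some m := by
              conv_lhs =>
                rw [← List.takeWhile_append_dropWhile
                  (p := fun y : String × Int => !decide (y.2 < x.2)) (l := s)]
              rw [List.find?_append, h1]
              rfl
            rw [hfs]
            simp [pvOptState, pvStep, hQx, hnlt]
        | none =>
            have hfs : List.find? Q s
                = List.find? Q (s.dropWhile (fun y => !decide (y.2 < x.2))) := by
              conv_lhs =>
                rw [← List.takeWhile_append_dropWhile
                  (p := fun y : String × Int => !decide (y.2 < x.2)) (l := s)]
              rw [List.find?_append, h1]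
              rfl
            rw [hfs, List.find?_cons_of_pos hQx]
            cases h2 : List.find? Q (s.dropWhile (fun y => !decide (y.2 < x.2))) with
            | none => simp [pvOptState, pvStep, hQx, hx]
            | some m =>
                have hmlt : m.2 < x.2 := pvMem_drop_lt x s hdesc m (List.mem_of_find?_eq_some h2)
                simp [pvOptState, pvStep, hQx, hmlt]
      · rw [List.find?_cons_of_neg (by simp [hQx]), ← List.find?_append,
          List.takeWhile_append_dropWhile]
        simp [pvStep, hQx]

-- counter items carry positive counts
theorem counter_items_pos (xs : List String) :
    ∀ kv ∈ (PySem.Dict.counter (κ := String) xs).items, (0 : Int) < kv.2 := by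
  rw [PySem.Dict.items_counter]
  intro kv h
  simp only [List.mem_map] at h
  obtain ⟨k, hk, rfl⟩ := h
  have hmem : k ∈ xs := (PySem.Set.mem_ofList _ _).mp hk
  have := List.count_pos_iff.mpr hmem
  simpa using this

theorem pvContains_ofList (sl : List String) (x : String) :
    PySem.Set.contains (PySem.Set.ofList sl) x = sl.contains x := by
  by_cases h : x ∈ sl <;>
    simp [PySem.Set.contains_eq_listContains, PySem.Set.mem_ofList, h]

-- ===== VERDICT (by name: the statement is the Claim_ definition above) =====
theorem get_final_detection_spec : Claim_equal_get_final_detection := by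
  intro detections static_list _
  unfold Spec_get_final_detection get_final_detection get_final_detection_alt
  simp only [List.flatMap_id', ← List.foldl_flatten,
    PySem.Dict.foldl_insert_getD_add_one_eq_counter, pvContains_ofList]
  rw [show (fun (best : Option String × Int) (kv : String × Int) =>
        if static_list.contains kv.1 && decide (best.2 < kv.2) then (some kv.1, kv.2) else best)
      = pvStep (fun kv => static_list.contains kv.1) from rfl]
  rw [best_fold_eq _ _ (counter_items_pos detections.flatten)]
  by_cases h : detections.flatten = []
  · rw [if_pos h, h]
    rfl
  · rw [if_neg h, pvLoopA_eq_find?]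
    cases (PySem.List.sorted (PySem.Dict.counter detections.flatten).items
        (fun kv => kv.2) true).find? (fun kv => static_list.contains kv.1) with
    | none => rfl
    | some m => rfl
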